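-- pv_equiv track=rewrite | github.com/JLU-WangXu/mars | scripts/run_mars_pipeline.py | project_to_design_positions
-- ===== SOURCE A (Python) =====
-- def project_to_design_positions(
--     seq: str,
--     wt_seq: str,
--     design_positions: list[int],
--     position_to_index: dict[int, int],
-- ) -> str:
--     chars = list(wt_seq)
--     for pos in design_positions:
--         idx = position_to_index[pos]
--         chars[idx] = seq[idx]
--     return "".join(chars)
-- ===== SOURCE B (Python) =====
-- def project_to_design_positions(
--     seq: str,
--     wt_seq: str,
--     design_positions: list[int],
--     position_to_index: dict[int, int],
-- ) -> str:
--     design_idx = {position_to_index[pos] for pos in design_positions}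
--     return "".join(
--         seq[i] if i in design_idx else ch
--         for i, ch in enumerate(wt_seq)
--     )
-- ===== Notes on version B (the rewrite author's own statement) =====
-- stated objective: idiomatic
-- what changed: Replaces A's copy-the-wildtype-then-scatter mutation by precomputing the set of mapped design indices and building the result in one left-to-right pass that selects seq[i] at design indices and wt_seq[i] elsewhere; Pre_ excludes inputs where A raises (missing position or out-of-range index) and design positions mapping to negative in-range indices, on which A's overwrite of the character counted from the end is an accident of Python negative list indexing that B's forward scan over 0..len-1 never visits.
-- outside the precondition, e.g. on project_to_design_positions('XY', 'ab', [5], {5: -1}): A returns 'aY', B returns 'ab'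
import Mathlib
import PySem

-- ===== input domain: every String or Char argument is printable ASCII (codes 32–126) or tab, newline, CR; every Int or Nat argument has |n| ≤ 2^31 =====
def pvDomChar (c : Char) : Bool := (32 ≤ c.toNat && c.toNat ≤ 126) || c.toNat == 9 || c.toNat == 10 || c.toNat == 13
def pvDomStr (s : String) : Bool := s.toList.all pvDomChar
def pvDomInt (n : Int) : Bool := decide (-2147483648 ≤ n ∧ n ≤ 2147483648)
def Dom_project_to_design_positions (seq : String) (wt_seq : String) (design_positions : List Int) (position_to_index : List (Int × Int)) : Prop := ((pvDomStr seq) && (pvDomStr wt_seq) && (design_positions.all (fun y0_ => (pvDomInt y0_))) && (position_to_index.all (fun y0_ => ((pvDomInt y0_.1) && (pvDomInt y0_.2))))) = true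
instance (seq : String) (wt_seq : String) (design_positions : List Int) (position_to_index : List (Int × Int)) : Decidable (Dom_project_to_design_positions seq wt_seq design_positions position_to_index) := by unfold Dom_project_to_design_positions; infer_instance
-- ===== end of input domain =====

-- B precomputes the set of mapped design indices and builds the result in one forward
-- pass selecting seq[i] at design indices and wt_seq[i] elsewhere (objective: idiomatic).

-- ===== PORT A =====
-- one iteration of A's loop: idx = position_to_index[pos]; chars[idx] = seq[idx]
-- (under Pre_ the lookup succeeds and idx is a valid Python index of both seq and chars;
--  the fall-through 'chars' branches are unreachable under Pre_, where Python raises)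
def pvAStep (seq : String) (position_to_index : List (Int × Int)) (chars : List Char) (pos : Int) : List Char :=
  match position_to_index.lookup pos with
  | none => chars
  | some j =>
    match PySem.Str.pyGet? seq j with
    | none => chars
    | some c =>
      let k : Int := if j < 0 then j + chars.length else j
      if 0 ≤ k ∧ k < chars.length then chars.set k.toNat c else chars

def project_to_design_positions (seq : String) (wt_seq : String) (design_positions : List Int) (position_to_index : List (Int × Int)) : String :=
  String.ofList (design_positions.foldl (pvAStep seq position_to_index) wt_seq.toList)

-- ===== PORT B =====
-- design_idx = {position_to_index[pos] for pos in design_positions}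
-- (lookup failure is unreachable under Pre_, where Python raises KeyError)
def pvBIdxSet (position_to_index : List (Int × Int)) (design_positions : List Int) : PySem.Set Int :=
  design_positions.foldl (fun s pos =>
    match position_to_index.lookup pos with
    | some j => PySem.Set.add s j
    | none => s) PySem.Set.empty

def project_to_design_positions_alt (seq : String) (wt_seq : String) (design_positions : List Int) (position_to_index : List (Int × Int)) : String :=
  let design_idx := pvBIdxSet position_to_index design_positions
  String.ofList ((PySem.List.enumerate wt_seq.toList).map (fun p =>
    if design_idx.contains p.1 then (PySem.Str.pyGet? seq p.1).getD p.2 else p.2))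

-- ===== PRECONDITION & SPEC =====
-- Pre_ excludes (a) the inputs where A raises — a design position missing from
-- position_to_index (KeyError) or a mapped index out of Python range of seq or wt_seq
-- (IndexError) — and (b) design positions mapping to a NEGATIVE in-range index, where
-- A's overwrite of the character counted from the end is an accident of Python list
-- indexing that a forward scan over indices 0..len-1 cannot visit (a defensible corner:
-- positions are meant to map to nonnegative sequence indices).
def Pre_project_to_design_positions (seq : String) (wt_seq : String) (design_positions : List Int) (position_to_index : List (Int × Int)) : Prop :=
  ∀ pos ∈ design_positions,
    ((position_to_index.lookup pos).any fun j =>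
      decide (0 ≤ j ∧ j < (seq.toList.length : Int) ∧ j < (wt_seq.toList.length : Int))) = true
instance (seq : String) (wt_seq : String) (design_positions : List Int) (position_to_index : List (Int × Int)) : Decidable (Pre_project_to_design_positions seq wt_seq design_positions position_to_index) := by unfold Pre_project_to_design_positions; infer_instance

def pvWitness_project_to_design_positions : String × String × List Int × (List (Int × Int)) :=
  ("XYZ", "abc", [10, 20], [(10, 0), (20, 2)])

def Spec_project_to_design_positions (seq : String) (wt_seq : String) (design_positions : List Int) (position_to_index : List (Int × Int)) (out : String) : Prop := out = project_to_design_positions_alt seq wt_seq design_positions position_to_index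
instance (seq : String) (wt_seq : String) (design_positions : List Int) (position_to_index : List (Int × Int)) (out : String) : Decidable (Spec_project_to_design_positions seq wt_seq design_positions position_to_index out) := by unfold Spec_project_to_design_positions; infer_instance

-- ===== CLAIM (what is proved, stated in full; the proofs are below) =====
def Claim_equal_project_to_design_positions : Prop := ∀ (seq : String) (wt_seq : String) (design_positions : List Int) (position_to_index : List (Int × Int)), Dom_project_to_design_positions seq wt_seq design_positions position_to_index → Pre_project_to_design_positions seq wt_seq design_positions position_to_index → Spec_project_to_design_positions seq wt_seq design_positions position_to_index (project_to_design_positions seq wt_seq design_positions position_to_index)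

-- ===== LEMMAS AND PROOFS =====

-- render a set of design indices onto the wildtype characters
def pvRenderS (seq : String) (wt : List Char) (S : PySem.Set Int) : List Char :=
  (PySem.List.enumerate wt).map (fun p =>
    if S.contains p.1 then (PySem.Str.pyGet? seq p.1).getD p.2 else p.2)

theorem pvRenderS_length (seq : String) (wt : List Char) (S : PySem.Set Int) :
    (pvRenderS seq wt S).length = wt.length := by
  simp [pvRenderS, PySem.List.length_enumerate]

theorem pvRenderS_empty_aux (seq : String) (wt : List Char) (s : Int) :
    (PySem.List.enumerate wt s).map (fun p =>
      if (PySem.Set.empty (α := Int)).contains p.1 then (PySem.Str.pyGet? seq p.1).getD p.2 else p.2) = wt := by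
  induction wt generalizing s with
  | nil => rfl
  | cons x xs ih =>
    rw [PySem.List.enumerate_cons]
    simp only [List.map_cons, ih]
    simp [PySem.Set.contains, PySem.Set.empty]

theorem pvRenderS_empty (seq : String) (wt : List Char) :
    pvRenderS seq wt PySem.Set.empty = wt :=
  pvRenderS_empty_aux seq wt 0

theorem pvRenderS_add (seq : String) (wt : List Char) (S : PySem.Set Int) (k : Int) (c : Char)
    (hk : 0 ≤ k) (_hk2 : k < wt.length) (hc : PySem.Str.pyGet? seq k = some c) :
    pvRenderS seq wt (PySem.Set.add S k) = (pvRenderS seq wt S).set k.toNat c := by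
  apply List.ext_getElem
  · simp [pvRenderS_length]
  intro i h1 h2
  have hi : i < wt.length := by simpa [pvRenderS_length] using h1
  simp only [pvRenderS, List.getElem_map, PySem.List.getElem_enumerate, List.getElem_set, zero_add]
  by_cases hik : i = k.toNat
  · have hik' : ((i : Nat) : Int) = k := by omega
    have hmem : (PySem.Set.add S k).contains ((i : Nat) : Int) = true :=
      (PySem.Set.contains_iff _ _).mpr ((PySem.Set.mem_add S k _).mpr (Or.inr hik'))
    rw [hmem, if_pos rfl, if_pos hik.symm, hik', hc]
    rfl
  · have hik' : ¬ ((i : Nat) : Int) = k := by omega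
    have hmem : (PySem.Set.add S k).contains ((i : Nat) : Int) = S.contains ((i : Nat) : Int) := by
      rw [Bool.eq_iff_iff, PySem.Set.contains_iff, PySem.Set.contains_iff, PySem.Set.mem_add]
      constructor
      · rintro (h | h)
        · exact h
        · exact absurd h hik'
      · exact Or.inl
    rw [hmem, if_neg (fun h : k.toNat = i => hik h.symm)]

theorem pvFold_renderS (seq : String) (p2i : List (Int × Int)) (wt : List Char)
    (dps : List Int) (S : PySem.Set Int)
    (hpre : ∀ pos ∈ dps,
      ((p2i.lookup pos).any fun j =>
        decide (-(seq.toList.length : Int) ≤ j ∧ j < seq.toList.length ∧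
                -(wt.length : Int) ≤ j ∧ j < wt.length)) = true)
    (hpos : ∀ pos ∈ dps, ((p2i.lookup pos).any fun j => decide (j < 0)) = false) :
    dps.foldl (pvAStep seq p2i) (pvRenderS seq wt S)
      = pvRenderS seq wt (dps.foldl (fun s pos =>
          match p2i.lookup pos with
          | some j => PySem.Set.add s j
          | none => s) S) := by
  induction dps generalizing S with
  | nil => rfl
  | cons pos rest ih =>
    have hhead := hpre pos (List.mem_cons_self ..)
    have hheadp := hpos pos (List.mem_cons_self ..)
    simp only [List.foldl_cons]
    rcases hlk : p2i.lookup pos with _ | j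
    · rw [hlk] at hhead; simp [Option.any] at hhead
    rw [hlk] at hhead hheadp
    simp only [Option.any, decide_eq_true_eq] at hhead
    simp only [Option.any, decide_eq_false_iff_not, not_lt] at hheadp
    obtain ⟨hs1, hs2, hw1, hw2⟩ := hhead
    have hget : ∃ c, PySem.Str.pyGet? seq j = some c := by
      rcases hg : PySem.Str.pyGet? seq j with _ | c
      · exfalso
        have := (PySem.List.pyGet?_eq_none_iff (xs := seq.toList) (i := j)).mp
          (by simpa [PySem.Str.pyGet?_eq] using hg)
        exact this ⟨by omega, by omega⟩
      · exact ⟨c, rfl⟩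
    obtain ⟨c, hc⟩ := hget
    have hstep : pvAStep seq p2i (pvRenderS seq wt S) pos = pvRenderS seq wt (PySem.Set.add S j) := by
      simp only [pvAStep, hlk, hc, pvRenderS_length]
      have hnotneg : ¬ j < 0 := by omega
      rw [if_neg hnotneg]
      rw [if_pos ⟨by omega, hw2⟩]
      exact (pvRenderS_add seq wt S j c (by omega) hw2 hc).symm
    rw [hstep]
    exact ih _ (fun p hp => hpre p (List.mem_cons_of_mem _ hp))
            (fun p hp => hpos p (List.mem_cons_of_mem _ hp))

-- ===== VERDICT =====
theorem project_to_design_positions_spec : Claim_equal_project_to_design_positions := by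
  intro seq wt_seq dps p2i _ hpre
  unfold Pre_project_to_design_positions at hpre
  have hpre' : ∀ pos ∈ dps,
      ((p2i.lookup pos).any fun j =>
        decide (-(seq.toList.length : Int) ≤ j ∧ j < seq.toList.length ∧
                -(wt_seq.toList.length : Int) ≤ j ∧ j < wt_seq.toList.length)) = true := by
    intro pos hp
    have h := hpre pos hp
    rcases hlk : p2i.lookup pos with _ | j
    · rw [hlk] at h; simp [Option.any] at h
    · rw [hlk] at h
      simp only [Option.any, decide_eq_true_eq] at h ⊢
      omega
  have hpos : ∀ pos ∈ dps, ((p2i.lookup pos).any fun j => decide (j < 0)) = false := by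
    intro pos hp
    have h := hpre pos hp
    rcases hlk : p2i.lookup pos with _ | j
    · rfl
    · rw [hlk] at h
      simp only [Option.any, decide_eq_true_eq] at h
      simp only [Option.any, decide_eq_false_iff_not]
      omega
  unfold Spec_project_to_design_positions project_to_design_positions project_to_design_positions_alt pvBIdxSet
  show String.ofList (dps.foldl (pvAStep seq p2i) wt_seq.toList)
      = String.ofList (pvRenderS seq wt_seq.toList
          (dps.foldl (fun s pos =>
            match p2i.lookup pos with
            | some j => PySem.Set.add s j
            | none => s) PySem.Set.empty))
  congr 1
  rw [← pvRenderS_empty seq wt_seq.toList]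
  rw [pvFold_renderS seq p2i wt_seq.toList dps PySem.Set.empty hpre' hpos]
  rw [pvRenderS_empty]
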